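-- pv_equiv track=rewrite | github.com/jmolenaa/AOC2023 | day11/python/part2.py | get_distance_rows
-- ===== SOURCE A (Python) =====
-- def get_distance_rows(y1, y2, empty_rows):
-- 	ymin = min(y1, y2)
-- 	steps = 0
-- 	while ymin < max(y1, y2):
-- 		if ymin in empty_rows:
-- 			steps += 999999
-- 		steps += 1
-- 		ymin += 1
-- 	return steps
-- ===== SOURCE B (Python) =====
-- def get_distance_rows(y1, y2, empty_rows):
--     lo, hi = (y1, y2) if y1 <= y2 else (y2, y1)
--     return (hi - lo) + 999999 * len({r for r in empty_rows if lo <= r < hi})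
-- ===== Notes on version B (the rewrite author's own statement) =====
-- stated objective: faster
-- what changed: Replaces the step-by-step walk over every integer row between y1 and y2 with a closed form: span plus 999999 times the number of distinct empty rows inside the interval, computed by a single set-comprehension pass over empty_rows.
import Mathlib
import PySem

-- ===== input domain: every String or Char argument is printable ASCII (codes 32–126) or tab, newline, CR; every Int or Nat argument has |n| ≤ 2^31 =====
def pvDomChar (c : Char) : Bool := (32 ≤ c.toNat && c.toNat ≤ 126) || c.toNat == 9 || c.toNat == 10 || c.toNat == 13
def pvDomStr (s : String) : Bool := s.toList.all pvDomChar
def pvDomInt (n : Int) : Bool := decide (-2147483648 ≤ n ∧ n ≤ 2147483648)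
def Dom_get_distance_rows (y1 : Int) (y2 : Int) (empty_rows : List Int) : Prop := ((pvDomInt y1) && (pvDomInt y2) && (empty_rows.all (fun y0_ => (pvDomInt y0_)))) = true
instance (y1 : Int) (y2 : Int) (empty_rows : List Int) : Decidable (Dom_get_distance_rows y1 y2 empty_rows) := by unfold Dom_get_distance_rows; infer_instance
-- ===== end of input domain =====

-- B replaces A's per-row walk by a closed form: span + 999999 * |{distinct empty rows in the interval}| (objective: faster).

-- ===== PORT A =====
-- the while loop of A: state (ymin, steps), running while ymin < ymax
def pvGoA (ymax : Int) (empty_rows : List Int) (ymin : Int) (steps : Int) : Int :=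
  if ymin < ymax then
    pvGoA ymax empty_rows (ymin + 1)
      ((steps + (if empty_rows.contains ymin then 999999 else 0)) + 1)
  else steps
termination_by (ymax - ymin).toNat
decreasing_by omega

def get_distance_rows (y1 : Int) (y2 : Int) (empty_rows : List Int) : Int :=
  pvGoA (max y1 y2) empty_rows (min y1 y2) 0

-- ===== PORT B =====
def get_distance_rows_alt (y1 : Int) (y2 : Int) (empty_rows : List Int) : Int :=
  let lo := min y1 y2
  let hi := max y1 y2
  (hi - lo) + 999999 *
    ((PySem.Set.ofList (empty_rows.filter (fun r => decide (lo ≤ r) && decide (r < hi)))).length : Int)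

-- ===== PRECONDITION & SPEC =====
def Spec_get_distance_rows (y1 : Int) (y2 : Int) (empty_rows : List Int) (out : Int) : Prop := out = get_distance_rows_alt y1 y2 empty_rows
instance (y1 : Int) (y2 : Int) (empty_rows : List Int) (out : Int) : Decidable (Spec_get_distance_rows y1 y2 empty_rows out) := by unfold Spec_get_distance_rows; infer_instance

-- ===== CLAIM (what is proved, stated in full; the proofs are below) =====
def Claim_equal_get_distance_rows : Prop := ∀ (y1 : Int) (y2 : Int) (empty_rows : List Int), Dom_get_distance_rows y1 y2 empty_rows → Spec_get_distance_rows y1 y2 empty_rows (get_distance_rows y1 y2 empty_rows)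

-- ===== LEMMAS AND PROOFS =====

lemma pv_Ico_cons (lo hi : Int) (h : lo < hi) :
    Finset.Ico lo hi = insert lo (Finset.Ico (lo + 1) hi) := by
  ext x; simp only [Finset.mem_Ico, Finset.mem_insert]; omega

lemma pv_card_filter_step (lo hi : Int) (es : List Int) (h : lo < hi) :
    ((Finset.Ico lo hi).filter (fun v => v ∈ es)).card
      = (if lo ∈ es then 1 else 0) + ((Finset.Ico (lo + 1) hi).filter (fun v => v ∈ es)).card := by
  rw [pv_Ico_cons lo hi h, Finset.filter_insert]
  by_cases hm : lo ∈ es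
  · simp only [hm, if_true]
    rw [Finset.card_insert_of_notMem]
    · omega
    · simp only [Finset.mem_filter, Finset.mem_Ico]
      omega
  · simp [hm]

lemma pvGoA_spec (es : List Int) :
    ∀ (n : ℕ) (lo steps : Int),
      pvGoA (lo + n) es lo steps
        = steps + n + 999999 * ((Finset.Ico lo (lo + (n : Int))).filter (fun v => v ∈ es)).card := by
  intro n
  induction n with
  | zero =>
      intro lo steps
      rw [pvGoA]
      simp
  | succ n ih =>
      intro lo steps
      rw [pvGoA]
      have hlt : lo < lo + (((n : ℕ) + 1 : ℕ) : Int) := by push_cast; omega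
      rw [if_pos hlt]
      have harith : lo + (((n : ℕ) + 1 : ℕ) : Int) = lo + 1 + (n : Int) := by push_cast; ring
      rw [harith, ih (lo + 1), pv_card_filter_step lo (lo + 1 + (n : Int)) es (by omega)]
      by_cases hm : lo ∈ es
      · have hcont : es.contains lo = true := by simpa using hm
        rw [hcont]
        simp only [hm, if_true]
        push_cast
        ring
      · have hcont : es.contains lo = false := by simpa using hm
        rw [hcont]
        simp only [hm, if_false]
        push_cast
        ring

lemma pv_len_eq (lo hi : Int) (es : List Int) :
    ((PySem.Set.ofList (es.filter (fun r => decide (lo ≤ r) && decide (r < hi)))).length)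
      = ((Finset.Ico lo hi).filter (fun v => v ∈ es)).card := by
  have hnd : (PySem.Set.ofList (es.filter (fun r => decide (lo ≤ r) && decide (r < hi)))).Nodup :=
    PySem.Set.nodup_ofList _
  rw [← List.toFinset_card_of_nodup hnd]
  congr 1
  ext x
  simp only [List.mem_toFinset, PySem.Set.mem_ofList, List.mem_filter, Finset.mem_filter,
    Finset.mem_Ico, Bool.and_eq_true, decide_eq_true_eq]
  tauto

-- ===== VERDICT (by name: the statement is the Claim_ definition above) =====
theorem get_distance_rows_spec : Claim_equal_get_distance_rows := by
  intro y1 y2 es _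
  unfold Spec_get_distance_rows get_distance_rows get_distance_rows_alt
  show pvGoA (max y1 y2) es (min y1 y2) 0
      = (max y1 y2 - min y1 y2) + 999999 *
          (((PySem.Set.ofList (es.filter (fun r => decide (min y1 y2 ≤ r) && decide (r < max y1 y2)))).length : Int))
  obtain ⟨n, hn⟩ : ∃ n : ℕ, max y1 y2 = min y1 y2 + n :=
    ⟨(max y1 y2 - min y1 y2).toNat, by omega⟩
  rw [hn, pvGoA_spec es n (min y1 y2) 0, pv_len_eq]
  ring
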